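-- pv_equiv track=rewrite | github.com/rougeth/translator | translate.py | get_class_translations
-- ===== SOURCE A (Python) =====
-- def get_class_translations(my_str, word_class):
--     """
--     This function returns the translated words
--     for a given class as a string of separated words
--     @my_str -> the string returned by the http connection
--     @word_class -> one of the <classes> dictionary keys
--     """
--
--     index = my_str.find(word_class)
--     ret_str = ""
--
--     if index == -1:
--         return None
--
--     for i in range(index, len(my_str)):
--         if my_str[i] == "[":
--             for j in range (i + 1, len(my_str)):
--                 if my_str[j] == "]":
--                     return ret_str
--                 else:
--                     ret_str = ret_str + my_str[j]
-- ===== SOURCE B (Python) =====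
-- def get_class_translations(my_str, word_class):
--     index = my_str.find(word_class)
--     if index == -1:
--         return None
--     rest = my_str[index:]
--     open_i = rest.find("[")
--     if open_i == -1:
--         return None
--     seg = rest[open_i + 1:]
--     close_i = seg.find("]")
--     if close_i == -1:
--         return None
--     return seg[:close_i]
-- ===== Notes on version B (the rewrite author's own statement) =====
-- stated objective: idiomatic
-- what changed: Replaces A's hand-written nested character loops (outer scan for '[', inner char-by-char string accumulation until ']') with three str.find calls and slicing: find the keyword, find the next '[', find the next ']', slice the payload out.
import Mathlib
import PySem

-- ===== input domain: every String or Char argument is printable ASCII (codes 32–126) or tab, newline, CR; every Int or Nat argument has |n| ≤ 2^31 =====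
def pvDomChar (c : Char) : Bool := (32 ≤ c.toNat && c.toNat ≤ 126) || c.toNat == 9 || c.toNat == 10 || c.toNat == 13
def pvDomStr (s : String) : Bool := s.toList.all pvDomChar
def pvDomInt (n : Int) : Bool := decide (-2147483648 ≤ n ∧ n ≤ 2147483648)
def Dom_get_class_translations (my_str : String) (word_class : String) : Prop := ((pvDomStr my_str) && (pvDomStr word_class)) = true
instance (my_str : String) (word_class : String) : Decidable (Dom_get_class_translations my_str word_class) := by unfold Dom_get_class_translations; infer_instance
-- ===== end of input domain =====

-- B replaces A's hand-written nested character loops by str.find and slicing (same O(n) asymptotics, idiomatic).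

-- ===== PORT A =====
-- inner loop 'for j in range(i+1, len)': returns (some ret_at_return, ret) on ']', else falls through; both components carry the accumulated ret_str
def pvAInner : List Char → List Char → Option (List Char) × List Char
  | [], ret => (none, ret)
  | c :: cs, ret => if c = ']' then (some ret, ret) else pvAInner cs (ret ++ [c])

-- outer loop 'for i in range(index, len(my_str))', run over the suffix of my_str starting at index
def pvAOuter : List Char → List Char → Option (List Char)
  | [], _ => none
  | c :: cs, ret =>
    if c = '[' then
      match pvAInner cs ret with
      | (some r, _) => some r
      | (none, ret') => pvAOuter cs ret'
    else pvAOuter cs ret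

def get_class_translations (my_str : String) (word_class : String) : Option String :=
  let index := PySem.Str.find my_str word_class
  if index = -1 then none
  else
    match pvAOuter (my_str.toList.drop index.toNat) [] with
    | some r => some (String.ofList r)
    | none => none

-- ===== PORT B =====
def get_class_translations_alt (my_str : String) (word_class : String) : Option String :=
  let index := PySem.Str.find my_str word_class
  if index = -1 then none
  else
    let rest := PySem.Str.slice my_str (some index) none
    let openI := PySem.Str.find rest "["
    if openI = -1 then none
    else
      let seg := PySem.Str.slice rest (some (openI + 1)) none
      let closeI := PySem.Str.find seg "]"
      if closeI = -1 then none
      else some (PySem.Str.slice seg none (some closeI))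

-- ===== PRECONDITION & SPEC =====
def Spec_get_class_translations (my_str : String) (word_class : String) (out : Option String) : Prop := out = get_class_translations_alt my_str word_class
instance (my_str : String) (word_class : String) (out : Option String) : Decidable (Spec_get_class_translations my_str word_class out) := by unfold Spec_get_class_translations; infer_instance

-- ===== CLAIM (what is proved, stated in full; the proofs are below) =====
def Claim_equal_get_class_translations : Prop := ∀ (my_str : String) (word_class : String), Dom_get_class_translations my_str word_class → Spec_get_class_translations my_str word_class (get_class_translations my_str word_class)

-- ===== LEMMAS AND PROOFS =====

-- length of takeWhile pinned down by the first failing position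
theorem pvLenTakeWhile (p : Char → Bool) : ∀ (l : List Char) (n : Nat),
    (∃ x, l[n]? = some x ∧ p x = false) →
    (∀ i, i < n → ∀ y, l[i]? = some y → p y = true) →
    (l.takeWhile p).length = n := by
  intro l
  induction l with
  | nil => intro n hx _; rcases hx with ⟨x, hx, _⟩; simp at hx
  | cons a l ih =>
    intro n hx hlt
    cases n with
    | zero =>
      rcases hx with ⟨x, hx, hpx⟩
      simp at hx; subst hx
      simp [hpx]
    | succ n =>
      have hpa : p a = true := hlt 0 (Nat.succ_pos _) a rfl
      rcases hx with ⟨x, hx, hpx⟩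
      simp at hx
      have := ih n ⟨x, by simpa using hx, hpx⟩ (fun i hi y hy => hlt (i+1) (by omega) y (by simpa using hy))
      simp [hpa, this]

-- find of a single-character needle, characterised by takeWhile
theorem pvFind_single (l : List Char) (c : Char) :
    PySem.Chars.find l [c] = if c ∈ l then ((l.takeWhile (fun x => x ≠ c)).length : Int) else -1 := by
  split
  · rename_i h
    have hinf : [c] <:+: l := (List.singleton_infix_iff c l).mpr h
    have h0 : 0 ≤ PySem.Chars.find l [c] := (PySem.Chars.find_nonneg_iff l [c]).mpr hinf
    obtain ⟨hpre, hmin⟩ := PySem.Chars.find_spec h0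
    set n := (PySem.Chars.find l [c]).toNat with hn
    have hget : l[n]? = some c := by
      rcases hpre with ⟨t, ht⟩
      have : (l.drop n)[0]? = some c := by rw [← ht]; rfl
      simpa [List.getElem?_drop] using this
    have hlen : (l.takeWhile (fun x => x ≠ c)).length = n := by
      apply pvLenTakeWhile
      · exact ⟨c, hget, by simp⟩
      · intro i hi y hy
        have hni : ¬ [c] <+: l.drop i := hmin i hi
        simp only [decide_eq_true_eq]
        intro hyc; subst hyc
        apply hni
        have : (l.drop i)[0]? = some y := by simpa [List.getElem?_drop] using hy
        rcases List.getElem?_eq_some_iff.mp this with ⟨hlt, hel⟩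
        exact ⟨(l.drop i).tail, by
          cases hd : l.drop i with
          | nil => simp [hd] at this
          | cons a t => simp [hd] at this ⊢; simp [this] ⟩
    rw [hlen, hn]
    omega
  · rename_i h
    rw [PySem.Chars.find_eq_neg_one_iff]
    intro hinf
    exact h ((List.singleton_infix_iff c l).mp hinf)

theorem pvInner_not_mem (cs : List Char) : ∀ ret, ']' ∉ cs → pvAInner cs ret = (none, ret ++ cs) := by
  induction cs with
  | nil => intro ret _; simp [pvAInner]
  | cons c cs ih =>
    intro ret h
    have hc : ¬ c = ']' := fun hc => h (by simp [hc])
    simp only [pvAInner, if_neg hc]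
    rw [ih (ret ++ [c]) (fun hm => h (List.mem_cons_of_mem _ hm))]
    simp

theorem pvInner_mem (cs : List Char) : ∀ ret, ']' ∈ cs →
    pvAInner cs ret = (some (ret ++ cs.takeWhile (fun x => x ≠ ']')), ret ++ cs.takeWhile (fun x => x ≠ ']')) := by
  induction cs with
  | nil => intro ret h; simp at h
  | cons c cs ih =>
    intro ret h
    by_cases hc : c = ']'
    · subst hc
      simp [pvAInner]
    · have hm : ']' ∈ cs := (List.mem_cons.mp h).resolve_left (fun h1 => hc h1.symm)
      simp only [pvAInner, if_neg hc]
      rw [ih (ret ++ [c]) hm]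
      simp [hc]

theorem pvOuter_open (cs ret : List Char) :
    pvAOuter ('[' :: cs) ret =
      match pvAInner cs ret with
      | (some r, _) => some r
      | (none, ret') => pvAOuter cs ret' := by
  simp [pvAOuter]

theorem pvOuter_spec (l : List Char) : ∀ (ret : List Char),
    pvAOuter l ret =
      match l.dropWhile (fun x => x ≠ '[') with
      | [] => none
      | _ :: tl => if ']' ∈ tl then some (ret ++ tl.takeWhile (fun x => x ≠ ']')) else none := by
  induction l with
  | nil => intro ret; simp [pvAOuter]
  | cons c cs ih =>
    intro ret
    by_cases hc : c = '['
    · subst hc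
      rw [pvOuter_open]
      by_cases hm : ']' ∈ cs
      · rw [pvInner_mem cs ret hm]
        simp [hm]
      · rw [pvInner_not_mem cs ret hm]
        have hred : (match ((none : Option (List Char)), ret ++ cs) with
            | (some r, _) => some r
            | (none, ret') => pvAOuter cs ret') = pvAOuter cs (ret ++ cs) := rfl
        have hrhs : List.dropWhile (fun x => decide (x ≠ '[')) ('[' :: cs) = '[' :: cs := by simp
        rw [hred, ih (ret ++ cs), hrhs]
        cases hd : cs.dropWhile (fun x => decide (x ≠ '[')) with
        | nil => dsimp only; rw [if_neg hm]
        | cons a tl =>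
          have htl : ']' ∉ tl := fun hmem => hm (((hd ▸ List.dropWhile_suffix _).subset) (List.mem_cons_of_mem _ hmem))
          dsimp only
          rw [if_neg hm, if_neg htl]
    · simp only [pvAOuter, if_neg hc, List.dropWhile_cons]
      rw [ih ret]
      simp [hc]

-- take of the takeWhile-length is takeWhile
theorem pvTake_len_takeWhile (p : Char → Bool) (l : List Char) :
    l.take (l.takeWhile p).length = l.takeWhile p :=
  (List.prefix_iff_eq_take.mp (List.takeWhile_prefix p)).symm

-- drop of the takeWhile-length is dropWhile
theorem pvDrop_len_takeWhile (p : Char → Bool) (l : List Char) :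
    l.drop (l.takeWhile p).length = l.dropWhile p := by
  calc l.drop (l.takeWhile p).length
      = (l.takeWhile p ++ l.dropWhile p).drop (l.takeWhile p).length := by
        rw [List.takeWhile_append_dropWhile]
    _ = l.dropWhile p := List.drop_left

-- ===== VERDICT (by name: the statement is the Claim_ definition above) =====
theorem get_class_translations_spec : Claim_equal_get_class_translations := by
  intro my_str word_class _
  unfold Spec_get_class_translations get_class_translations get_class_translations_alt
  dsimp only
  set idx := PySem.Str.find my_str word_class with hidx
  by_cases hf : idx = -1
  · rw [if_pos hf, if_pos hf]
  · rw [if_neg hf, if_neg hf]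
    have h0 : 0 ≤ idx := by
      have h1 := PySem.Chars.neg_one_le_find my_str.toList word_class.toList
      have h2 : idx = PySem.Chars.find my_str.toList word_class.toList := by
        rw [hidx, PySem.Str.find_eq]
      omega
    set l := my_str.toList.drop idx.toNat with hl
    have hrest : (PySem.Str.slice my_str (some idx) none).toList = l := by
      rw [PySem.Str.toList_slice, PySem.Chars.slice_eq_listSlice, PySem.List.slice_from _ h0]
    have hfindopen : PySem.Str.find (PySem.Str.slice my_str (some idx) none) "[" = PySem.Chars.find l ['['] := by
      rw [PySem.Str.find_eq, hrest]
      rfl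
    rw [pvOuter_spec, hfindopen, pvFind_single]
    by_cases hob : '[' ∈ l
    · set k := (l.takeWhile (fun x => x ≠ '[')).length with hk
      have hne : ((k : Int)) ≠ -1 := by omega
      rw [if_pos hob, if_neg hne]
      have hdw : l.dropWhile (fun x => x ≠ '[') ≠ [] := by
        simp only [ne_eq, List.dropWhile_eq_nil_iff, not_forall]
        exact ⟨'[', hob, by simp⟩
      cases hd : l.dropWhile (fun x => x ≠ '[') with
      | nil => exact absurd hd hdw
      | cons a tl =>
        have hseg : (PySem.Str.slice (PySem.Str.slice my_str (some idx) none) (some ((k : Int) + 1)) none).toList = tl := by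
          rw [PySem.Str.toList_slice, hrest, PySem.Chars.slice_eq_listSlice, PySem.List.slice_from _ (by omega)]
          have h1 : ((k : Int) + 1).toNat = k + 1 := by omega
          rw [h1, ← List.drop_drop, hk, pvDrop_len_takeWhile, hd]
          simp
        have hfindclose : PySem.Str.find (PySem.Str.slice (PySem.Str.slice my_str (some idx) none) (some ((k : Int) + 1)) none) "]" = PySem.Chars.find tl [']'] := by
          rw [PySem.Str.find_eq, hseg]
          rfl
        rw [hfindclose, pvFind_single]
        dsimp only
        by_cases hcb : ']' ∈ tl
        · set m := (tl.takeWhile (fun x => x ≠ ']')).length with hm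
          have hmne : ((m : Int)) ≠ -1 := by omega
          rw [if_pos hcb, if_pos hcb, if_neg hmne]
          dsimp only
          show (some (String.ofList ([] ++ tl.takeWhile (fun x => x ≠ ']'))) : Option String) = _
          have hsl : (PySem.Str.slice (PySem.Str.slice (PySem.Str.slice my_str (some idx) none) (some ((k : Int) + 1)) none) none (some ((m : Int)))).toList = tl.takeWhile (fun x => x ≠ ']') := by
            rw [PySem.Str.toList_slice, hseg, PySem.Chars.slice_eq_listSlice, PySem.List.slice_to _ (by omega)]
            have h1 : ((m : Int)).toNat = m := by omega
            rw [h1, hm, pvTake_len_takeWhile]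
          calc (some (String.ofList ([] ++ tl.takeWhile (fun x => x ≠ ']'))) : Option String)
              = some (String.ofList ((PySem.Str.slice (PySem.Str.slice (PySem.Str.slice my_str (some idx) none) (some ((k : Int) + 1)) none) none (some ((m : Int)))).toList)) := by
                rw [hsl]; simp
            _ = some (PySem.Str.slice (PySem.Str.slice (PySem.Str.slice my_str (some idx) none) (some ((k : Int) + 1)) none) none (some ((m : Int)))) := by
                rw [String.ofList_toList]
        · rw [if_neg hcb, if_neg hcb, if_pos rfl]
    · have hdw : l.dropWhile (fun x => x ≠ '[') = [] := by
        rw [List.dropWhile_eq_nil_iff]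
        intro x hx
        simp only [decide_eq_true_eq]
        intro h; exact hob (h ▸ hx)
      rw [hdw, if_neg hob, if_pos rfl]
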